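-- pv_equiv track=rewrite | github.com/Rational-Curiosity/Python-LaTeX | python/pytex.py | mode_cont_pure
-- ===== SOURCE A (Python) =====
-- def mode_cont_pure(X):
--     n = len(X)
--     difs = []
--     for i in range(n):
--         difs.append(0)
--         for j in range(n):
--             difs[-1] += abs(X[j] - X[i])
--     return X[difs.index(min(difs))]
-- ===== SOURCE B (Python) =====
-- def mode_cont_pure(X):
--     n = len(X)
--     s = sorted(X)
--     total = sum(s)
--     cost = {}
--     prefix = 0
--     for k in range(n):
--         v = s[k]
--         cost[v] = v * k - prefix + (total - prefix) - v * (n - k)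
--         prefix += v
--     best = X[0]
--     best_c = cost[best]
--     for v in X:
--         c = cost[v]
--         if c < best_c:
--             best, best_c = v, c
--     return best
-- ===== Notes on version B (the rewrite author's own statement) =====
-- stated objective: faster
-- what changed: A computes each point's sum of absolute differences with a nested O(n^2) double loop; B sorts once and derives every point's cost from prefix sums in a single pass, then picks the first cost-minimizing element in one scan.
import Mathlib
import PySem

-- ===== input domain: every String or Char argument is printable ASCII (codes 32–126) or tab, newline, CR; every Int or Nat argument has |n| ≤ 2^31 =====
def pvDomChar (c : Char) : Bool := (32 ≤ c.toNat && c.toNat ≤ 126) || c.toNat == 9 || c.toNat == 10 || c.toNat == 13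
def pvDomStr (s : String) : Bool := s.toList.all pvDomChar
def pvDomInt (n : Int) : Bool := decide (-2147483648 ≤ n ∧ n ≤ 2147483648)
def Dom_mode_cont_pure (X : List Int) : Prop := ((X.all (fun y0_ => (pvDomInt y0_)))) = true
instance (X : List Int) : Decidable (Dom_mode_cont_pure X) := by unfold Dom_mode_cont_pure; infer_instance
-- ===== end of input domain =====

-- B replaces A's all-pairs absolute-difference sums by sorted prefix sums (one cost per value) plus a first-minimum scan.

-- ===== PORT A =====
def mode_cont_pure (X : List Int) : Int :=
  let n : Int := X.length
  let difs : List Int :=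
    (PySem.List.pyRange 0 n 1).foldl (fun difs i =>
      difs ++ [(PySem.List.pyRange 0 n 1).foldl
        (fun d j => d + |PySem.List.pyGetD X j 0 - PySem.List.pyGetD X i 0|) 0]) []
  match PySem.List.min? difs (fun x => x) with
  | none => 0   -- Python raises ValueError here (X = []); excluded by Pre_
  | some m =>
    match PySem.List.index? difs m with
    | none => 0
    | some k => PySem.List.pyGetD X (k : Int) 0

-- ===== PORT B =====
def mode_cont_pure_alt (X : List Int) : Int :=
  let n : Int := X.length
  let s := PySem.List.sorted X (fun x => x) false
  let total := s.sum
  let st : PySem.Dict Int Int × Int :=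
    (PySem.List.pyRange 0 n 1).foldl (fun p k =>
      let v := PySem.List.pyGetD s k 0
      (p.1.insert v (v * k - p.2 + (total - p.2) - v * (n - k)), p.2 + v))
      (PySem.Dict.empty, 0)
  let cost := st.1
  match X with
  | [] => 0   -- Python raises IndexError here; excluded by Pre_
  | x :: _ =>
    let r := X.foldl (fun (b : Int × Int) v =>
      let c := cost.getD v 0
      if c < b.2 then (v, c) else b) (x, cost.getD x 0)
    r.1

-- ===== PRECONDITION & SPEC =====
-- Pre_ excludes only the empty list, on which Python A raises ValueError (min of empty sequence).
def Pre_mode_cont_pure (X : List Int) : Prop := X ≠ []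
instance (X : List Int) : Decidable (Pre_mode_cont_pure X) := by unfold Pre_mode_cont_pure; infer_instance
def pvWitness_mode_cont_pure : List Int := [3, 1, 2]

def Spec_mode_cont_pure (X : List Int) (out : Int) : Prop := out = mode_cont_pure_alt X
instance (X : List Int) (out : Int) : Decidable (Spec_mode_cont_pure X out) := by unfold Spec_mode_cont_pure; infer_instance

-- ===== CLAIM (what is proved, stated in full; the proofs are below) =====
def Claim_equal_mode_cont_pure : Prop := ∀ (X : List Int), Dom_mode_cont_pure X → Pre_mode_cont_pure X → Spec_mode_cont_pure X (mode_cont_pure X)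

-- ===== LEMMAS AND PROOFS =====

-- total absolute deviation of X from the point v (the quantity both programs minimize)
def pvF (X : List Int) (v : Int) : Int := (X.map (fun x => |x - v|)).sum

-- first element (scanning left to right) whose g-value is strictly below everything seen so far:
-- the common selection both programs perform
def pvFm (g : Int → Int) : List Int → Int → Int
  | [], b => b
  | v :: t, b => if g v < g b then pvFm g t v else pvFm g t b

lemma pv_sum_sub_left (v : Int) (L : List Int) :
    (L.map (fun x => v - x)).sum = v * L.length - L.sum := by
  induction L with
  | nil => simp
  | cons y t ih => simp [ih]; ring

lemma pv_sum_sub_right (v : Int) (L : List Int) :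
    (L.map (fun x => x - v)).sum = L.sum - v * L.length := by
  induction L with
  | nil => simp
  | cons y t ih => simp [ih]; ring

-- split formula: for a sorted list s and position k, the total deviation from s[k]
lemma pv_sum_split (s : List Int) (k : Nat) (hk : k < s.length)
    (hs : s.Pairwise (· ≤ ·)) :
    pvF s s[k] = s[k] * k - (s.take k).sum + (s.sum - (s.take k).sum) - s[k] * ((s.length : Int) - k) := by
  have hle : ∀ x ∈ s.take k, x ≤ s[k] := by
    intro x hx
    obtain ⟨j, hj, hxj⟩ := List.mem_iff_getElem.mp hx
    have hjk : j < k := by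
      have := hj; simp [List.length_take] at this; omega
    have hjs : j < s.length := by omega
    have he : (s.take k)[j] = s[j] := List.getElem_take
    rw [he] at hxj
    rw [← hxj]
    exact List.pairwise_iff_getElem.mp hs j k hjs hk hjk
  have hge : ∀ x ∈ s.drop k, s[k] ≤ x := by
    intro x hx
    obtain ⟨j, hj, hxj⟩ := List.mem_iff_getElem.mp hx
    have hlen : j < s.length - k := by simpa [List.length_drop] using hj
    have hxg : (s.drop k)[j] = s[k + j] := List.getElem_drop
    rw [hxg] at hxj
    rw [← hxj]
    rcases Nat.eq_zero_or_pos j with h0 | hpos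
    · subst h0; simp
    · exact List.pairwise_iff_getElem.mp hs k (k + j) hk (by omega) (by omega)
  have hsplit : s.take k ++ s.drop k = s := List.take_append_drop k s
  set v := s[k] with hv
  have e1 : ∀ x ∈ s.take k, |x - v| = v - x := fun x hx => by
    have := hle x hx
    rw [abs_of_nonpos (by omega)]
    ring
  have e2 : ∀ x ∈ s.drop k, |x - v| = x - v := fun x hx => by
    have := hge x hx
    exact abs_of_nonneg (by omega)
  have h1 : ((s.take k).map (fun x => |x - v|)).sum = v * k - (s.take k).sum := by
    rw [List.map_congr_left e1, pv_sum_sub_left]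
    congr 2
    simp [List.length_take]
    omega
  have h2 : ((s.drop k).map (fun x => |x - v|)).sum
      = (s.sum - (s.take k).sum) - v * ((s.length : Int) - k) := by
    rw [List.map_congr_left e2, pv_sum_sub_right]
    have hdsum : (s.take k).sum + (s.drop k).sum = s.sum := by
      rw [← List.sum_append, hsplit]
    have hdlen : ((s.drop k).length : Int) = (s.length : Int) - k := by
      simp [List.length_drop]
      omega
    rw [hdlen]
    omega
  have hmain : pvF s v = ((s.take k).map (fun x => |x - v|)).sum
        + ((s.drop k).map (fun x => |x - v|)).sum := by
    unfold pvF
    conv_lhs => rw [← hsplit]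
    rw [List.map_append, List.sum_append]
  rw [hmain, h1, h2]
  ring

lemma pv_pvF_perm {s X : List Int} (h : s.Perm X) (v : Int) : pvF s v = pvF X v :=
  List.Perm.sum_eq (h.map _)

-- A's difs list is the list of total deviations, one per element of X
lemma pv_difs_eq (X : List Int) :
    ((PySem.List.pyRange 0 (X.length : Int) 1).foldl (fun difs i =>
      difs ++ [(PySem.List.pyRange 0 (X.length : Int) 1).foldl
        (fun d j => d + |PySem.List.pyGetD X j 0 - PySem.List.pyGetD X i 0|) 0]) [])
    = X.map (pvF X) := by
  rw [PySem.List.foldl_append_singleton_eq_map]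
  have hinner : ∀ i : Int,
      (PySem.List.pyRange 0 (X.length : Int) 1).foldl
        (fun d j => d + |PySem.List.pyGetD X j 0 - PySem.List.pyGetD X i 0|) 0
      = pvF X (PySem.List.pyGetD X i 0) := by
    intro i
    rw [PySem.List.foldl_pyRange_zero_pyGetD' X 0
      (fun d x => d + |x - PySem.List.pyGetD X i 0|) 0]
    rw [PySem.List.foldl_add]
    simp [pvF]
  simp only [hinner, List.nil_append]
  set g := pvF X with hg
  conv_rhs => rw [← PySem.List.map_pyGetD_pyRange_zero' X 0]
  rw [List.map_map]
  simp [Function.comp_def]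

-- invariant of B's prefix-sum fold: the running sum is the prefix sum and every key
-- inserted so far maps to its total deviation
lemma pv_cost_inv (X : List Int) (m : Nat)
    (hm : m ≤ (PySem.List.sorted X (fun x => x) false).length) :
    (((PySem.List.pyRange 0 (m : Int) 1).foldl (fun p k =>
        let v := PySem.List.pyGetD (PySem.List.sorted X (fun x => x) false) k 0
        (p.1.insert v (v * k - p.2 + ((PySem.List.sorted X (fun x => x) false).sum - p.2)
            - v * ((X.length : Int) - k)), p.2 + v))
      ((PySem.Dict.empty : PySem.Dict Int Int), 0)).2
      = ((PySem.List.sorted X (fun x => x) false).take m).sum)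
    ∧ ∀ v : Int,
      (((PySem.List.pyRange 0 (m : Int) 1).foldl (fun p k =>
        let w := PySem.List.pyGetD (PySem.List.sorted X (fun x => x) false) k 0
        (p.1.insert w (w * k - p.2 + ((PySem.List.sorted X (fun x => x) false).sum - p.2) - w * ((X.length : Int) - k)), p.2 + w))
      ((PySem.Dict.empty : PySem.Dict Int Int), 0)).1.get? v
      = if v ∈ (PySem.List.sorted X (fun x => x) false).take m then some (pvF X v) else none) := by
  set s := PySem.List.sorted X (fun x => x) false with hsdef
  induction m with
  | zero => simp [PySem.List.pyRange]
  | succ m ih =>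
    have hm' : m ≤ s.length := by omega
    obtain ⟨ih2, ih1⟩ := ih hm'
    have hms : m < s.length := by omega
    have hstep : ((m : Int) + 1) = ((m + 1 : Nat) : Int) := by push_cast; ring
    rw [show ((m + 1 : Nat) : Int) = (m : Int) + 1 by push_cast; ring,
        PySem.List.pyRange_one_succ_right (by positivity)]
    rw [List.foldl_append]
    set P := (PySem.List.pyRange 0 (m : Int) 1).foldl (fun p k =>
        let v := PySem.List.pyGetD s k 0
        (p.1.insert v (v * k - p.2 + (s.sum - p.2) - v * ((X.length : Int) - k)), p.2 + v))
      ((PySem.Dict.empty : PySem.Dict Int Int), 0) with hP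
    have hv : PySem.List.pyGetD s (m : Int) 0 = s[m] := by
      rw [PySem.List.pyGetD_natCast, List.getD_eq_getElem _ _ hms]
    have htake : s.take (m+1) = s.take m ++ [s[m]] := by
      rw [List.take_add_one, List.getElem?_eq_getElem hms]; rfl
    have hvmem : s[m] ∈ s.take (m+1) := by
      rw [htake]; exact List.mem_append_right _ (List.mem_singleton.mpr rfl)
    have hval : s[m] * (m : Int) - P.2 + (s.sum - P.2) - s[m] * ((X.length : Int) - m)
        = pvF X s[m] := by
      rw [ih2]
      have hXlen : (X.length : Int) = (s.length : Int) := by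
        rw [hsdef, PySem.List.length_sorted]
      rw [hXlen]
      rw [← pv_pvF_perm (PySem.List.sorted_perm X (fun x => x) false) s[m]]
      rw [pv_sum_split s m hms (by simpa using PySem.List.sorted_pairwise X (fun x => x))]
    constructor
    · simp only [List.foldl_cons, List.foldl_nil, hv]
      rw [htake, List.sum_append, ih2]
      simp
    · intro v
      simp only [List.foldl_cons, List.foldl_nil, hv]
      rw [PySem.Dict.get?_insert, ih1 v, htake]
      by_cases hveq : v = s[m]
      · subst hveq
        rw [if_pos rfl, if_pos (List.mem_append_right _ (List.mem_singleton.mpr rfl)), hval]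
      · have h2 : (v ∈ s.take m ++ [s[m]]) ↔ (v ∈ s.take m) := by
          simp only [List.mem_append, List.mem_singleton, hveq, or_false]
        rw [if_neg hveq]
        by_cases hvm : v ∈ s.take m
        · rw [if_pos hvm, if_pos (h2.mpr hvm)]
        · rw [if_neg hvm, if_neg (fun h => hvm (h2.mp h))]

-- B's selection scan computes pvFm
lemma pv_scan (g : Int → Int) (L : List Int) : ∀ b : Int,
    L.foldl (fun p v => if g v < p.2 then (v, g v) else p) (b, g b)
    = (pvFm g L b, g (pvFm g L b)) := by
  induction L with
  | nil => intro b; simp [pvFm]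
  | cons v t ih =>
    intro b
    simp only [List.foldl_cons, pvFm]
    by_cases h : g v < g b
    · simp [h, ih v]
    · simp [h, ih b]

-- A's min-then-index selection also computes pvFm
lemma pv_asel (g : Int → Int) : ∀ (xs : List Int) (x : Int),
    ∃ k : Nat, PySem.List.index? ((x :: xs).map g) ((xs.map g).foldl min (g x)) = some k ∧
      (x :: xs).getD k 0 = pvFm g xs x := by
  intro xs
  induction xs with
  | nil =>
    intro x
    exact ⟨0, by simp, by simp [pvFm]⟩
  | cons y t ih =>
    intro x
    have hfold : ((y :: t).map g).foldl min (g x) = (t.map g).foldl min (min (g x) (g y)) := by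
      simp
    by_cases hlt : g y < g x
    · -- head x is never the min; selection continues in (y :: t)
      have hmin : min (g x) (g y) = g y := by omega
      obtain ⟨k, hk, hgd⟩ := ih y
      have hM : (t.map g).foldl min (g y) ≤ g y := (PySem.List.foldl_min_le (t.map g) (g y)).1
      have hne : g x ≠ (t.map g).foldl min (g y) := by omega
      refine ⟨k + 1, ?_, ?_⟩
      · rw [List.map_cons, hfold, hmin, PySem.List.index?_cons_of_ne _ hne, hk]; rfl
      · simpa [pvFm, hlt] using hgd
    · -- g x ≤ g y
      have hxy : g x ≤ g y := by omega
      have hmin : min (g x) (g y) = g x := by omega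
      obtain ⟨k, hk, hgd⟩ := ih x
      rw [hfold, hmin]
      set M := (t.map g).foldl min (g x) with hM
      have hMle : M ≤ g x := (PySem.List.foldl_min_le (t.map g) (g x)).1
      by_cases hxM : g x = M
      · refine ⟨0, ?_, ?_⟩
        · rw [List.map_cons, ← hxM, PySem.List.index?_cons_self]
        · -- k from ih must be 0 since head matches
          have : PySem.List.index? ((x :: t).map g) M = some 0 := by
            rw [List.map_cons, ← hxM, PySem.List.index?_cons_self]
          rw [hk] at this
          have hk0 : k = 0 := Option.some.inj this
          have hx0 : pvFm g t x = x := by rw [← hgd, hk0]; rfl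
          simp [pvFm, hlt, hx0]
      · have hyM : g y ≠ M := by omega
        -- in IH the index skips the head x
        have hk' : ∃ k', PySem.List.index? (t.map g) M = some k' ∧ k = k' + 1 := by
          rw [List.map_cons, PySem.List.index?_cons_of_ne _ (Ne.symm (Ne.symm hxM))] at hk
          cases h : PySem.List.index? (t.map g) M with
          | none => rw [h] at hk; simp at hk
          | some k' => rw [h] at hk; simp at hk; exact ⟨k', rfl, hk.symm⟩
        obtain ⟨k', hk'', hkk⟩ := hk'
        refine ⟨k' + 2, ?_, ?_⟩
        · rw [List.map_cons, PySem.List.index?_cons_of_ne _ (Ne.symm (Ne.symm hxM)),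
            List.map_cons, PySem.List.index?_cons_of_ne _ hyM, hk'']
          rfl
        · have : (x :: t).getD k 0 = pvFm g t x := hgd
          rw [hkk] at this
          simpa [pvFm, hlt] using this

-- ===== VERDICT (by name: the statement is the Claim_ definition above) =====
theorem mode_cont_pure_spec : Claim_equal_mode_cont_pure := by
  intro X _ hpre
  obtain ⟨x, xs, rfl⟩ : ∃ x xs, X = x :: xs := by
    cases X with
    | nil => exact absurd rfl hpre
    | cons a t => exact ⟨a, t, rfl⟩
  unfold Spec_mode_cont_pure mode_cont_pure mode_cont_pure_alt
  simp only []
  -- B side: dict lookups return the total deviation pvF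
  have hlen : (PySem.List.sorted (x :: xs) (fun x => x) false).length = (x :: xs).length :=
    PySem.List.length_sorted (x :: xs) (fun x => x) false
  obtain ⟨_, hget⟩ := pv_cost_inv (x :: xs) (x :: xs).length (by omega)
  have hcost : ∀ v ∈ (x :: xs),
      (((PySem.List.pyRange 0 (((x :: xs).length : Nat) : Int) 1).foldl (fun p k =>
        let v := PySem.List.pyGetD (PySem.List.sorted (x :: xs) (fun x => x) false) k 0
        (p.1.insert v (v * k - p.2 + ((PySem.List.sorted (x :: xs) (fun x => x) false).sum - p.2)
            - v * ((((x :: xs).length : Nat) : Int) - k)), p.2 + v))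
      ((PySem.Dict.empty : PySem.Dict Int Int), 0)).1).getD v 0 = pvF (x :: xs) v := by
    intro v hv
    have hvt : v ∈ (PySem.List.sorted (x :: xs) (fun x => x) false).take (x :: xs).length := by
      rw [← hlen, List.take_length]
      exact (PySem.List.mem_sorted (x :: xs) (fun x => x) false v).mpr hv
    have hsome := hget v
    rw [if_pos hvt] at hsome
    exact PySem.Dict.getD_of_get?_eq_some _ _ hsome
  rw [pv_difs_eq (x :: xs)]
  obtain ⟨k, hidx, hgd⟩ := pv_asel (pvF (x :: xs)) xs x
  rw [List.map_cons, PySem.List.min?_id_cons (pvF (x :: xs) x) (xs.map (pvF (x :: xs))),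
    ← List.map_cons]
  simp only []
  rw [hidx]
  simp only []
  rw [PySem.List.pyGetD_natCast, hgd]
  -- B side
  rw [PySem.List.foldl_congr_mem (x :: xs) _
    (fun (b : Int × Int) v => if pvF (x :: xs) v < b.2 then (v, pvF (x :: xs) v) else b) _
    (fun acc v hv => by rw [hcost v hv])]
  rw [hcost x (List.mem_cons_self)]
  rw [pv_scan (pvF (x :: xs)) (x :: xs) x]
  show pvFm (pvF (x :: xs)) xs x = pvFm (pvF (x :: xs)) (x :: xs) x
  simp [pvFm]
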